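-- pv_equiv track=rewrite | github.com/hel-astro-lab/runko | runko/hilbert.py | _generalhilbertindexinv_2d
-- ===== SOURCE A (Python) =====
-- def bit(i, k):
--     return (i >> k) & 1
--
-- def setbit(i, k, value):
--     return (i & ~(1 << k)) | (value << k)
--
-- def rotl(value, shift, dim):
--     return ((value << shift) | (value >> (dim - shift))) & ((1 << dim) - 1)
--
-- def gc(i):
--     return i ^ (i >> 1)
--
-- def tsb(i):
--     k = 0
--     while (i & 1) != 0:
--         i = i >> 1
--         k += 1
--     return k
--
-- def direction(i, dim):
--     if i == 0:
--         return 0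
--     if (i & 1) != 0:
--         return tsb(i) % dim
--     return tsb(i - 1) % dim
--
-- def entry(i):
--     if i == 0:
--         return 0
--     return gc(2 * ((i - 1) // 2))
--
-- def tedinv(e, d, b, dim):
--     return rotl(b, d + 1, dim) ^ e
--
-- def _hilbertindexinv_2d(m, h, einit, dinit):
--     """Inverse 2D cubic Hilbert index. Returns (x, y)."""
--     e, d = einit, dinit
--     x, y = 0, 0
--     for i in range(m - 1, -1, -1):
--         w = ((bit(h, 2*i + 1)) << 1) + bit(h, 2*i)
--         l = gc(w)
--         l = tedinv(e, d, l, 2)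
--         x = setbit(x, i, bit(l, 0))
--         y = setbit(y, i, bit(l, 1))
--         e = e ^ rotl(entry(w), d + 1, 2)
--         d = (d + direction(w, 2) + 1) % 2
--     return x, y
--
-- def _generalhilbertindexinv_2d(m0, m1, h):
--     """Inverse general 2D Hilbert index. Returns (x, y)."""
--     einit = 0
--     dinit = 0
--     shift = 0
--     localh = h
--
--     if m0 >= m1:
--         mmin, mmax = m1, m0
--         shift_x = True
--         dinit = 0
--     else:
--         mmin, mmax = m0, m1
--         shift_x = False
--         dinit = 1
--
--     for i in range(mmax + mmin - 1, mmin + mmin - 1, -1):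
--         l = bit(localh, i)
--         shift += l * (1 << (i - mmin))
--         localh -= l * (1 << i)
--
--     x, y = _hilbertindexinv_2d(mmin, localh, einit, dinit)
--
--     if shift_x:
--         x += shift
--     else:
--         y += shift
--
--     return x, y
-- ===== SOURCE B (Python) =====
-- def _generalhilbertindexinv_2d(m0, m1, h):
--     """Inverse general 2D Hilbert index. Returns (x, y)."""
--     if m0 >= m1:
--         mmin, mmax, swap = m1, m0, False
--     else:
--         mmin, mmax, swap = m0, m1, True
--
--     # closed-form extraction of the prefix bits (no per-bit loop)
--     mid = (h >> (2 * mmin)) % (1 << (mmax - mmin))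
--     shift = mid << mmin
--     localh = h - (mid << (2 * mmin))
--
--     # LSB-first Hilbert decode: transform the accumulated coordinates
--     # bottom-up (classic d2xy), instead of threading an (entry, direction)
--     # state through an MSB-first digit scan.
--     x = y = 0
--     t = localh
--     for k in range(mmin):
--         s = 1 << k
--         rx = 1 & (t >> 1)
--         ry = 1 & (t ^ rx)
--         if ry == 0:
--             if rx == 1:
--                 x = s - 1 - x
--                 y = s - 1 - y
--             x, y = y, x
--         x += s * rx
--         y += s * ry
--         t >>= 2
--
--     if swap:
--         x, y = y, x
--         return x, y + shift
--     return x + shift, y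
-- ===== Notes on version B (the rewrite author's own statement) =====
-- stated objective: alternative
-- what changed: B replaces A's MSB-first digit scan that threads a generic (entry, direction) state through helper functions (gc/tedinv/entry/direction/tsb/setbit) by the classic LSB-first Hilbert decode that transforms the accumulated coordinates bottom-up (reflect/swap per digit, no curve state), and replaces A's per-bit prefix-extraction loop by closed-form mask/shift arithmetic.
-- outside the precondition, e.g. on _generalhilbertindexinv_2d(-2, -2, 5): A returns (0, 0), B raises ValueError
import Mathlib
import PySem

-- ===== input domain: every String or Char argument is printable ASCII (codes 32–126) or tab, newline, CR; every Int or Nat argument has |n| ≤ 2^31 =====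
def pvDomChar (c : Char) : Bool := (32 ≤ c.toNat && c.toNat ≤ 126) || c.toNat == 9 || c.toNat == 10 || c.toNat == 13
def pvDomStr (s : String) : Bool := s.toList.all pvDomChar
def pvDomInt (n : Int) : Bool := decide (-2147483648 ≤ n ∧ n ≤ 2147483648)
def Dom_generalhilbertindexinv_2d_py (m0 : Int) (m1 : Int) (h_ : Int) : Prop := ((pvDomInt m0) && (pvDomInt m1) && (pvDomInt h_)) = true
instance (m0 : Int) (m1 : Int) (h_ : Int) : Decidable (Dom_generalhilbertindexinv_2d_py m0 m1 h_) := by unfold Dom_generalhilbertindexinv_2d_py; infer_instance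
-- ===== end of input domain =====

-- B replaces A's MSB-first digit scan threading an (entry, direction) state and its per-bit
-- prefix-extraction loop by the classic LSB-first Hilbert decode (bottom-up coordinate
-- transformation, no entry/direction state) plus closed-form prefix arithmetic (objective: alternative).

-- ===== PORT A =====
-- Python int shifts raise on a negative shift amount; Pre_ keeps m0, m1 ≥ 0 so every
-- shift amount below is nonnegative and .toNat is exact.
def pvBitA (i : Int) (k : Int) : Int := PySem.Int.band (i >>> k.toNat) 1

def pvSetbitA (i : Int) (k : Int) (value : Int) : Int :=
  PySem.Int.bor (PySem.Int.band i (Int.not (1 <<< k.toNat))) (value <<< k.toNat)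

def pvRotlA (value : Int) (shift : Int) (dim : Int) : Int :=
  PySem.Int.band (PySem.Int.bor (value <<< shift.toNat) (value >>> (dim - shift).toNat))
    ((1 <<< dim.toNat) - 1)

def pvGcA (i : Int) : Int := PySem.Int.bxor i (i >>> (1 : Nat))

-- Python's 'while (i & 1) != 0' loop, run with enough fuel: for every argument on which the
-- Python loop terminates, the number of iterations (trailing ones of i) is ≤ i.natAbs.
def pvTsbGoA : Nat → Int → Int → Int
  | 0, _, k => k
  | fuel+1, i, k => if PySem.Int.band i 1 ≠ 0 then pvTsbGoA fuel (i >>> (1 : Nat)) (k+1) else k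

def pvTsbA (i : Int) : Int := pvTsbGoA (i.natAbs + 1) i 0

def pvDirectionA (i : Int) (dim : Int) : Int :=
  if i = 0 then 0
  else if PySem.Int.band i 1 ≠ 0 then PySem.Int.mod (pvTsbA i) dim
  else PySem.Int.mod (pvTsbA (i - 1)) dim

def pvEntryA (i : Int) : Int :=
  if i = 0 then 0 else pvGcA (2 * (PySem.Int.floordiv (i - 1) 2))

def pvTedinvA (e : Int) (d : Int) (b : Int) (dim : Int) : Int :=
  PySem.Int.bxor (pvRotlA b (d + 1) dim) e

def pvHilbStepA (h : Int) (st : Int × Int × Int × Int) (i : Int) : Int × Int × Int × Int :=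
  let e := st.1; let d := st.2.1; let x := st.2.2.1; let y := st.2.2.2
  let w := ((pvBitA h (2*i + 1)) <<< (1 : Nat)) + pvBitA h (2*i)
  let l := pvGcA w
  let l := pvTedinvA e d l 2
  let x := pvSetbitA x i (pvBitA l 0)
  let y := pvSetbitA y i (pvBitA l 1)
  let e := PySem.Int.bxor e (pvRotlA (pvEntryA w) (d + 1) 2)
  let d := PySem.Int.mod (d + pvDirectionA w 2 + 1) 2
  (e, d, x, y)

def pvHilbertindexinv2dA (m : Int) (h : Int) (einit : Int) (dinit : Int) : Int × Int :=
  let st := (PySem.List.pyRange (m - 1) (-1) (-1)).foldl (pvHilbStepA h) (einit, dinit, 0, 0)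
  (st.2.2.1, st.2.2.2)

def pvPrefStepA (mmin : Int) (p : Int × Int) (i : Int) : Int × Int :=
  let l := pvBitA p.2 i
  (p.1 + l * (1 <<< (i - mmin).toNat), p.2 - l * (1 <<< i.toNat))

def generalhilbertindexinv_2d_py (m0 : Int) (m1 : Int) (h_ : Int) : Int × Int :=
  let einit : Int := 0
  let md := if m0 ≥ m1 then (m1, m0, true, (0 : Int)) else (m0, m1, false, (1 : Int))
  let mmin := md.1; let mmax := md.2.1; let shiftX := md.2.2.1; let dinit := md.2.2.2
  let sl := (PySem.List.pyRange (mmax + mmin - 1) (mmin + mmin - 1) (-1)).foldl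
      (pvPrefStepA mmin) (0, h_)
  let xy := pvHilbertindexinv2dA mmin sl.2 einit dinit
  if shiftX then (xy.1 + sl.1, xy.2) else (xy.1, xy.2 + sl.1)

-- ===== PORT B =====
-- one iteration of Source B's LSB-first decode loop: state (x, y, t)
def pvWikiStepB (st : Int × Int × Int) (k : Int) : Int × Int × Int :=
  let x := st.1; let y := st.2.1; let t := st.2.2
  let s : Int := 1 <<< k.toNat
  let rx := PySem.Int.band 1 (t >>> (1 : Nat))
  let ry := PySem.Int.band 1 (PySem.Int.bxor t rx)
  let xy := if ry = 0 then (if rx = 1 then (s - 1 - y, s - 1 - x) else (y, x)) else (x, y)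
  (xy.1 + s * rx, xy.2 + s * ry, t >>> (2 : Nat))

def generalhilbertindexinv_2d_py_alt (m0 : Int) (m1 : Int) (h_ : Int) : Int × Int :=
  let md := if m0 ≥ m1 then (m1, m0, false) else (m0, m1, true)
  let mmin := md.1; let mmax := md.2.1; let swap := md.2.2
  let mid := PySem.Int.mod (h_ >>> (2*mmin).toNat) (1 <<< (mmax - mmin).toNat)
  let shift := mid <<< mmin.toNat
  let localh := h_ - (mid <<< (2*mmin).toNat)
  let st := (PySem.List.pyRange 0 mmin 1).foldl pvWikiStepB (0, 0, localh)
  if swap then (st.2.1, st.1 + shift) else (st.1 + shift, st.2.1)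

-- ===== PRECONDITION & SPEC =====
-- Pre_ restricts to nonnegative bit counts m0, m1 (the function's natural domain): for
-- min(m0,m1) < 0 Python A raises ValueError on a negative shift count whenever m0 ≠ m1,
-- and in the accidental m0 = m1 < 0 corner (empty loops, A returns (0,0)) B's closed-form
-- shift arithmetic itself raises ValueError.
def Pre_generalhilbertindexinv_2d_py (m0 : Int) (m1 : Int) (h_ : Int) : Prop :=
  0 ≤ m0 ∧ 0 ≤ m1

instance (m0 : Int) (m1 : Int) (h_ : Int) : Decidable (Pre_generalhilbertindexinv_2d_py m0 m1 h_) := by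
  unfold Pre_generalhilbertindexinv_2d_py; infer_instance

def pvWitness_generalhilbertindexinv_2d_py : Int × Int × Int := (2, 3, 7)

def Spec_generalhilbertindexinv_2d_py (m0 : Int) (m1 : Int) (h_ : Int) (out : Int × Int) : Prop :=
  out = generalhilbertindexinv_2d_py_alt m0 m1 h_

instance (m0 : Int) (m1 : Int) (h_ : Int) (out : Int × Int) : Decidable (Spec_generalhilbertindexinv_2d_py m0 m1 h_ out) := by
  unfold Spec_generalhilbertindexinv_2d_py; infer_instance

-- ===== CLAIM (what is proved, stated in full; the proofs are below) =====
def Claim_equal_generalhilbertindexinv_2d_py : Prop := ∀ (m0 : Int) (m1 : Int) (h_ : Int), Dom_generalhilbertindexinv_2d_py m0 m1 h_ → Pre_generalhilbertindexinv_2d_py m0 m1 h_ → Spec_generalhilbertindexinv_2d_py m0 m1 h_ (generalhilbertindexinv_2d_py m0 m1 h_)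

-- ===== LEMMAS AND PROOFS =====

theorem pv_pyRange_desc_nil (a b : Int) (h : a ≤ b) : PySem.List.pyRange a b (-1) = [] := by
  simp only [PySem.List.pyRange]
  norm_num
  intro h'
  omega

theorem pv_pyRange_desc_cons (a b : Int) (h : b < a) :
    PySem.List.pyRange a b (-1) = a :: PySem.List.pyRange (a - 1) b (-1) := by
  simp only [PySem.List.pyRange]
  norm_num
  rw [if_pos h]
  have h1 : (a - b).toNat = (a - 1 - b).toNat + 1 := by omega
  rw [h1, List.range_succ_eq_map]
  by_cases hb : b < a - 1
  · rw [if_pos hb]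
    simp only [List.map_cons, List.map_map]
    refine List.cons_eq_cons.mpr ⟨by norm_num, ?_⟩
    apply List.map_congr_left
    intro k _
    simp [Function.comp]
    ring
  · rw [if_neg hb]
    have h2 : (a - 1 - b).toNat = 0 := by omega
    rw [h2]
    simp

theorem pv_shiftR (x : Int) (k : Nat) : x >>> k = x / 2 ^ k := by
  simpa using Int.shiftRight_eq_div_pow x k

theorem pv_shiftL (x : Int) (k : Nat) : x <<< k = x * 2 ^ k := Int.shiftLeft_eq x k

theorem pv_band_one (x : Int) : PySem.Int.band x 1 = x % 2 := by
  simp [pysem]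

theorem pv_bitA_eq (x : Int) (k : Int) : pvBitA x k = x / 2 ^ k.toNat % 2 := by
  rw [pvBitA, pv_band_one, pv_shiftR]

theorem pv_half_split (q P : Int) (hP : 0 < P) : q % (2*P) = ((q / P) % 2) * P + q % P := by
  rw [Int.emod_def, Int.emod_def, Int.emod_def,
      show (2:Int)*P = P*2 by ring, ← Int.ediv_ediv_of_nonneg (by omega : (0:Int) ≤ P)]
  ring

theorem pv_setbit_add (x : Int) (i : Int) (v : Int) (hx : 0 ≤ x)
    (hd : (2 ^ (i.toNat + 1) : Int) ∣ x) (hv : v = 0 ∨ v = 1) :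
    pvSetbitA x i v = x + v * 2 ^ i.toNat := by
  set n := i.toNat with hn
  have hone : (1 : Nat) <<< n = 2 ^ n := Nat.one_shiftLeft n
  have hdvd : (2 ^ (n+1) : Nat) ∣ x.toNat := by
    have hcast : ((2:Int) ^ (n+1)) = ((2 ^ (n+1) : Nat) : Int) := by push_cast; rfl
    rw [← Int.toNat_of_nonneg hx, hcast, Int.natCast_dvd_natCast] at hd
    exact hd
  obtain ⟨c, hc⟩ := hdvd
  have htb : x.toNat.testBit n = false := by
    rw [Nat.testBit_eq_decide_div_mod_eq, hc, pow_succ,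
        show 2 ^ n * 2 * c = 2 ^ n * (2 * c) by ring,
        Nat.mul_div_cancel_left _ (Nat.two_pow_pos n)]
    simp [Nat.mul_mod_right]
  show PySem.Int.bor (PySem.Int.band x (Int.not ((1:Nat) <<< n : Nat))) (v <<< n) = x + v * 2 ^ n
  rw [hone]
  have hnot : Int.not (((2 ^ n : Nat) : Nat) : Int) = Int.negSucc (2 ^ n) := rfl
  have hband : PySem.Int.band x (Int.not ((2 ^ n : Nat) : Int)) = x := by
    rw [hnot]
    unfold PySem.Int.band
    rw [if_pos hx, if_neg (not_le.mpr (Int.negSucc_lt_zero _))]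
    have harg : (-(Int.negSucc (2 ^ n)) - 1).toNat = 2 ^ n := by
      rw [Int.negSucc_eq]
      norm_num
      rfl
    rw [harg, Nat.and_two_pow, htb]
    simp [Int.toNat_of_nonneg hx]
  rw [hband]
  rcases hv with rfl | rfl
  · have h0 : (0:Int) <<< n = 0 := by simp
    unfold PySem.Int.bor
    rw [h0, if_pos hx, if_pos le_rfl]
    simp [Int.toNat_of_nonneg hx]
  · have h1 : (1:Int) <<< n = ((2:Int))^n := by rw [Int.shiftLeft_eq]; ring
    unfold PySem.Int.bor
    rw [if_pos hx, if_pos (by rw [h1]; positivity)]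
    have h1t : ((1:Int) <<< n).toNat = 2 ^ n := by rw [h1]; rfl
    rw [h1t]
    have hor : x.toNat ||| 2 ^ n = x.toNat + 2 ^ n := by
      have hlt : (2:Nat) ^ n < 2 ^ (n+1) := Nat.pow_lt_pow_succ (by norm_num)
      have hsh := Nat.shiftLeft_add_eq_or_of_lt (a := c) (b := 2 ^ n) (i := n+1) hlt
      rw [Nat.shiftLeft_eq] at hsh
      rw [hc, Nat.mul_comm (2^(n+1)) c, ← hsh]
    rw [hor]
    have := Int.toNat_of_nonneg hx
    push_cast
    omega

-- low-bit arithmetic for B's loop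
theorem pv_nat_one_and (n : Nat) : Int.toNat 1 &&& n = n % 2 := by
  show 1 &&& n = n % 2
  exact Nat.one_and_eq_mod_two n

theorem pv_band1 (z : Int) : PySem.Int.band 1 z = z % 2 := by
  unfold PySem.Int.band
  split_ifs with h1 h2
  · rw [pv_nat_one_and]
    omega
  · rw [pv_nat_one_and]
    have := Nat.mod_two_eq_zero_or_one (-z - 1).toNat
    omega
  all_goals omega

theorem pv_bxor_zero (z : Int) : PySem.Int.bxor z 0 = z := by
  unfold PySem.Int.bxor
  split_ifs with h1 <;> simp <;> omega

theorem pv_bxor_one_mod (z : Int) : (PySem.Int.bxor z 1) % 2 = 1 - z % 2 := by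
  unfold PySem.Int.bxor
  rcases (by omega : 0 ≤ z ∨ z < 0) with hz | hz
  · rw [if_pos hz, if_pos (by norm_num : (0:Int) ≤ 1)]
    have h := Nat.xor_mod_two_eq (m := z.toNat) (n := Int.toNat 1)
    simp only [Int.toNat_one] at h ⊢
    omega
  · rw [if_neg (by omega), if_pos (by norm_num : (0:Int) ≤ 1)]
    have h := Nat.xor_mod_two_eq (m := (-z - 1).toNat) (n := Int.toNat 1)
    simp only [Int.toNat_one] at h ⊢
    omega

theorem pv_sr_sr (x : Int) (a b : Nat) : (x >>> a) >>> b = x >>> (a + b) := by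
  rw [pv_shiftR, pv_shiftR, pv_shiftR, pow_add, Int.ediv_ediv_of_nonneg (by positivity)]

-- the orientation of the square selected by A's reachable (e, d) states
def pvT (e d N a b : Int) : Int × Int :=
  if e = 0 then (if d = 0 then (a, b) else (b, a))
  else if d = 0 then (N - 1 - a, N - 1 - b) else (N - 1 - b, N - 1 - a)

def pvW (n : Nat) (h : Int) : Int × Int × Int :=
  (PySem.List.pyRange 0 (n : Int) 1).foldl pvWikiStepB (0, 0, h)

-- named components of A's loop body (to rewrite the fold head)
def pvWA (h : Int) (i : Int) : Int := ((pvBitA h (2*i + 1)) <<< (1 : Nat)) + pvBitA h (2*i)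
def pvLA (h e d : Int) (i : Int) : Int := pvTedinvA e d (pvGcA (pvWA h i)) 2
def pvE1A (h e d : Int) (i : Int) : Int := PySem.Int.bxor e (pvRotlA (pvEntryA (pvWA h i)) (d + 1) 2)
def pvD1A (h e d : Int) (i : Int) : Int := PySem.Int.mod (d + pvDirectionA (pvWA h i) 2 + 1) 2

theorem pv_step_eq (h e d x y : Int) (i : Int) :
    pvHilbStepA h (e, d, x, y) i
    = (pvE1A h e d i, pvD1A h e d i,
       pvSetbitA x i (pvBitA (pvLA h e d i) 0), pvSetbitA y i (pvBitA (pvLA h e d i) 1)) := rfl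

theorem pv_bit_01 (l k : Int) : pvBitA l k = 0 ∨ pvBitA l k = 1 := by
  rw [pv_bitA_eq]; omega

-- computing one iteration of B's loop, per digit (b1 = bit 1 of t, b0 = bit 0)
theorem pv_wiki_step00 (x y t k : Int) (h0 : t % 2 = 0) (h1 : (t >>> (1:Nat)) % 2 = 0) :
    pvWikiStepB (x, y, t) k = (y, x, t >>> (2:Nat)) := by
  simp only [pvWikiStepB]
  rw [show PySem.Int.band 1 (t >>> (1:Nat)) = 0 from by rw [pv_band1, h1], pv_bxor_zero,
      show PySem.Int.band 1 t = 0 from by rw [pv_band1, h0]]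
  norm_num

theorem pv_wiki_step01 (x y t k : Int) (h0 : t % 2 = 1) (h1 : (t >>> (1:Nat)) % 2 = 0) :
    pvWikiStepB (x, y, t) k = (x, y + (1:Int) <<< k.toNat, t >>> (2:Nat)) := by
  simp only [pvWikiStepB]
  rw [show PySem.Int.band 1 (t >>> (1:Nat)) = 0 from by rw [pv_band1, h1], pv_bxor_zero,
      show PySem.Int.band 1 t = 1 from by rw [pv_band1, h0]]
  norm_num

theorem pv_wiki_step10 (x y t k : Int) (h0 : t % 2 = 0) (h1 : (t >>> (1:Nat)) % 2 = 1) :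
    pvWikiStepB (x, y, t) k
      = (x + (1:Int) <<< k.toNat, y + (1:Int) <<< k.toNat, t >>> (2:Nat)) := by
  simp only [pvWikiStepB]
  rw [show PySem.Int.band 1 (t >>> (1:Nat)) = 1 from by rw [pv_band1, h1],
      show PySem.Int.band 1 (PySem.Int.bxor t 1) = 1 from by
        rw [pv_band1, pv_bxor_one_mod, h0]; norm_num]
  norm_num

theorem pv_wiki_step11 (x y t k : Int) (h0 : t % 2 = 1) (h1 : (t >>> (1:Nat)) % 2 = 1) :
    pvWikiStepB (x, y, t) k
      = ((1:Int) <<< k.toNat - 1 - y + (1:Int) <<< k.toNat, (1:Int) <<< k.toNat - 1 - x,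
         t >>> (2:Nat)) := by
  simp only [pvWikiStepB]
  rw [show PySem.Int.band 1 (t >>> (1:Nat)) = 1 from by rw [pv_band1, h1],
      show PySem.Int.band 1 (PySem.Int.bxor t 1) = 0 from by
        rw [pv_band1, pv_bxor_one_mod, h0]; norm_num]
  norm_num

-- THE KEY LEMMA: A's MSB-first (entry, direction)-state fold equals the symmetry pvT e d
-- applied to B's LSB-first decode, for the four reachable states, with aligned offsets.
theorem pv_key (n : Nat) (h : Int) :
    (pvW n h).2.2 = h >>> (2*n) ∧
    ∀ e d X Y : Int, (e = 0 ∨ e = 3) → (d = 0 ∨ d = 1) → 0 ≤ X → 0 ≤ Y →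
      (((PySem.List.pyRange ((n : Int) - 1) (-1) (-1)).foldl (pvHilbStepA h)
          (e, d, X * 2^n, Y * 2^n)).2.2.1,
       ((PySem.List.pyRange ((n : Int) - 1) (-1) (-1)).foldl (pvHilbStepA h)
          (e, d, X * 2^n, Y * 2^n)).2.2.2)
      = (X * 2^n + (pvT e d (2^n) (pvW n h).1 (pvW n h).2.1).1,
         Y * 2^n + (pvT e d (2^n) (pvW n h).1 (pvW n h).2.1).2) := by
  induction n with
  | zero =>
    have hW : pvW 0 h = (0, 0, h) := by
      simp [pvW, PySem.List.pyRange_one_eq_nil (le_refl (0:Int))]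
    constructor
    · rw [hW]
      norm_num [pv_shiftR]
    · intro e d X Y he hd hX hY
      rw [pv_pyRange_desc_nil _ _ (by omega), hW]
      rcases he with rfl | rfl <;> rcases hd with rfl | rfl <;> simp [pvT]
  | succ n ih =>
    obtain ⟨iht, ihc⟩ := ih
    have hWsucc : pvW (n+1) h = pvWikiStepB (pvW n h) (n : Int) := by
      rw [pvW, show ((n+1 : Nat) : Int) = (n : Int) + 1 by push_cast; ring,
          PySem.List.pyRange_one_succ_right (by positivity), List.foldl_append]
      rfl
    set wx := (pvW n h).1 with hwx
    set wy := (pvW n h).2.1 with hwy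
    have hWn : pvW n h = (wx, wy, h >>> (2*n)) := by
      rw [hwx, hwy, ← iht]
    have hb0 : (h >>> (2*n)) % 2 = h / 2 ^ (2*n) % 2 := by rw [pv_shiftR]
    have hb1 : ((h >>> (2*n)) >>> (1:Nat)) % 2 = h / 2 ^ (2*n+1) % 2 := by
      rw [pv_sr_sr, pv_shiftR]
    have hbitA0 : pvBitA h (2*((n:Nat):Int)) = h / 2 ^ (2*n) % 2 := by
      rw [pv_bitA_eq, show ((2*((n:Nat):Int))).toNat = 2*n by omega]
    have hbitA1 : pvBitA h (2*((n:Nat):Int) + 1) = h / 2 ^ (2*n+1) % 2 := by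
      rw [pv_bitA_eq, show ((2*((n:Nat):Int) + 1)).toNat = 2*n+1 by omega]
    have hs : ((1:Int) <<< ((n : Int)).toNat) = 2^n := by
      rw [show ((n:Int)).toNat = n by omega, pv_shiftL]; ring
    have ht2 : (h >>> (2*n)) >>> (2:Nat) = h >>> (2*(n+1)) := by
      rw [pv_sr_sr, show 2*n + 2 = 2*(n+1) by ring]
    constructor
    · rw [hWsucc, hWn]
      exact ht2
    · intro e d X Y he hd hX hY
      rw [show ((n+1 : Nat) : Int) - 1 = (n : Int) by push_cast; ring,
          pv_pyRange_desc_cons _ _ (by omega : (-1:Int) < (n:Int)), List.foldl_cons, pv_step_eq]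
      have hv0 := pv_bit_01 (pvLA h e d (n:Int)) 0
      have hv1 := pv_bit_01 (pvLA h e d (n:Int)) 1
      have hXd : (2 ^ ((((n:Nat):Int)).toNat + 1) : Int) ∣ X * 2 ^ (n+1) := by
        rw [show (((n:Nat):Int)).toNat = n by omega]; exact ⟨X, by ring⟩
      have hYd : (2 ^ ((((n:Nat):Int)).toNat + 1) : Int) ∣ Y * 2 ^ (n+1) := by
        rw [show (((n:Nat):Int)).toNat = n by omega]; exact ⟨Y, by ring⟩
      rw [pv_setbit_add _ _ _ (by positivity) hXd hv0,
          pv_setbit_add _ _ _ (by positivity) hYd hv1,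
          show (((n:Nat):Int)).toNat = n by omega]
      rcases he with rfl | rfl <;> rcases hd with rfl | rfl <;>
        rcases Int.emod_two_eq_zero_or_one (h / 2 ^ (2*n+1)) with hc1 | hc1 <;>
        rcases Int.emod_two_eq_zero_or_one (h / 2 ^ (2*n)) with hc0 | hc0
      · -- e=0 d=0 b1=0 b0=0 (digit w=0)
        have hwv : pvWA h (n:Int) = 0 := by
          simp only [pvWA]
          rw [hbitA0, hbitA1, hc0, hc1]
          decide
        have hE : pvE1A h 0 0 (n:Int) = 0 := by
          simp only [pvE1A, hwv]; decide
        have hD : pvD1A h 0 0 (n:Int) = 1 := by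
          simp only [pvD1A, hwv]; decide
        have hlx : pvBitA (pvLA h 0 0 (n:Int)) 0 = 0 := by
          simp only [pvLA, hwv]; decide
        have hly : pvBitA (pvLA h 0 0 (n:Int)) 1 = 0 := by
          simp only [pvLA, hwv]; decide
        rw [hE, hD, hlx, hly,
            show X * 2^(n+1) + (0:Int) * 2^n = (2*X + 0) * 2^n by ring,
            show Y * 2^(n+1) + (0:Int) * 2^n = (2*Y + 0) * 2^n by ring,
            ihc 0 1 (2*X + 0) (2*Y + 0) (Or.inl rfl) (Or.inr rfl) (by omega) (by omega),
            hWsucc, hWn,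
            pv_wiki_step00 wx wy _ _ (by rw [hb0]; exact hc0) (by rw [hb1]; exact hc1)]
        simp only [pvT]
        norm_num
        constructor <;> ring
      · -- e=0 d=0 b1=0 b0=1 (digit w=1)
        have hwv : pvWA h (n:Int) = 1 := by
          simp only [pvWA]
          rw [hbitA0, hbitA1, hc0, hc1]
          decide
        have hE : pvE1A h 0 0 (n:Int) = 0 := by
          simp only [pvE1A, hwv]; decide
        have hD : pvD1A h 0 0 (n:Int) = 0 := by
          simp only [pvD1A, hwv]; decide
        have hlx : pvBitA (pvLA h 0 0 (n:Int)) 0 = 0 := by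
          simp only [pvLA, hwv]; decide
        have hly : pvBitA (pvLA h 0 0 (n:Int)) 1 = 1 := by
          simp only [pvLA, hwv]; decide
        rw [hE, hD, hlx, hly,
            show X * 2^(n+1) + (0:Int) * 2^n = (2*X + 0) * 2^n by ring,
            show Y * 2^(n+1) + (1:Int) * 2^n = (2*Y + 1) * 2^n by ring,
            ihc 0 0 (2*X + 0) (2*Y + 1) (Or.inl rfl) (Or.inl rfl) (by omega) (by omega),
            hWsucc, hWn,
            pv_wiki_step01 wx wy _ _ (by rw [hb0]; exact hc0) (by rw [hb1]; exact hc1)]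
        simp only [pvT, hs]
        norm_num
        constructor <;> ring
      · -- e=0 d=0 b1=1 b0=0 (digit w=2)
        have hwv : pvWA h (n:Int) = 2 := by
          simp only [pvWA]
          rw [hbitA0, hbitA1, hc0, hc1]
          decide
        have hE : pvE1A h 0 0 (n:Int) = 0 := by
          simp only [pvE1A, hwv]; decide
        have hD : pvD1A h 0 0 (n:Int) = 0 := by
          simp only [pvD1A, hwv]; decide
        have hlx : pvBitA (pvLA h 0 0 (n:Int)) 0 = 1 := by
          simp only [pvLA, hwv]; decide
        have hly : pvBitA (pvLA h 0 0 (n:Int)) 1 = 1 := by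
          simp only [pvLA, hwv]; decide
        rw [hE, hD, hlx, hly,
            show X * 2^(n+1) + (1:Int) * 2^n = (2*X + 1) * 2^n by ring,
            show Y * 2^(n+1) + (1:Int) * 2^n = (2*Y + 1) * 2^n by ring,
            ihc 0 0 (2*X + 1) (2*Y + 1) (Or.inl rfl) (Or.inl rfl) (by omega) (by omega),
            hWsucc, hWn,
            pv_wiki_step10 wx wy _ _ (by rw [hb0]; exact hc0) (by rw [hb1]; exact hc1)]
        simp only [pvT, hs]
        norm_num
        constructor <;> ring
      · -- e=0 d=0 b1=1 b0=1 (digit w=3)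
        have hwv : pvWA h (n:Int) = 3 := by
          simp only [pvWA]
          rw [hbitA0, hbitA1, hc0, hc1]
          decide
        have hE : pvE1A h 0 0 (n:Int) = 3 := by
          simp only [pvE1A, hwv]; decide
        have hD : pvD1A h 0 0 (n:Int) = 1 := by
          simp only [pvD1A, hwv]; decide
        have hlx : pvBitA (pvLA h 0 0 (n:Int)) 0 = 1 := by
          simp only [pvLA, hwv]; decide
        have hly : pvBitA (pvLA h 0 0 (n:Int)) 1 = 0 := by
          simp only [pvLA, hwv]; decide
        rw [hE, hD, hlx, hly,
            show X * 2^(n+1) + (1:Int) * 2^n = (2*X + 1) * 2^n by ring,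
            show Y * 2^(n+1) + (0:Int) * 2^n = (2*Y + 0) * 2^n by ring,
            ihc 3 1 (2*X + 1) (2*Y + 0) (Or.inr rfl) (Or.inr rfl) (by omega) (by omega),
            hWsucc, hWn,
            pv_wiki_step11 wx wy _ _ (by rw [hb0]; exact hc0) (by rw [hb1]; exact hc1)]
        simp only [pvT, hs]
        norm_num
        constructor <;> ring
      · -- e=0 d=1 b1=0 b0=0 (digit w=0)
        have hwv : pvWA h (n:Int) = 0 := by
          simp only [pvWA]
          rw [hbitA0, hbitA1, hc0, hc1]
          decide
        have hE : pvE1A h 0 1 (n:Int) = 0 := by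
          simp only [pvE1A, hwv]; decide
        have hD : pvD1A h 0 1 (n:Int) = 0 := by
          simp only [pvD1A, hwv]; decide
        have hlx : pvBitA (pvLA h 0 1 (n:Int)) 0 = 0 := by
          simp only [pvLA, hwv]; decide
        have hly : pvBitA (pvLA h 0 1 (n:Int)) 1 = 0 := by
          simp only [pvLA, hwv]; decide
        rw [hE, hD, hlx, hly,
            show X * 2^(n+1) + (0:Int) * 2^n = (2*X + 0) * 2^n by ring,
            show Y * 2^(n+1) + (0:Int) * 2^n = (2*Y + 0) * 2^n by ring,
            ihc 0 0 (2*X + 0) (2*Y + 0) (Or.inl rfl) (Or.inl rfl) (by omega) (by omega),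
            hWsucc, hWn,
            pv_wiki_step00 wx wy _ _ (by rw [hb0]; exact hc0) (by rw [hb1]; exact hc1)]
        simp only [pvT]
        norm_num
        constructor <;> ring
      · -- e=0 d=1 b1=0 b0=1 (digit w=1)
        have hwv : pvWA h (n:Int) = 1 := by
          simp only [pvWA]
          rw [hbitA0, hbitA1, hc0, hc1]
          decide
        have hE : pvE1A h 0 1 (n:Int) = 0 := by
          simp only [pvE1A, hwv]; decide
        have hD : pvD1A h 0 1 (n:Int) = 1 := by
          simp only [pvD1A, hwv]; decide
        have hlx : pvBitA (pvLA h 0 1 (n:Int)) 0 = 1 := by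
          simp only [pvLA, hwv]; decide
        have hly : pvBitA (pvLA h 0 1 (n:Int)) 1 = 0 := by
          simp only [pvLA, hwv]; decide
        rw [hE, hD, hlx, hly,
            show X * 2^(n+1) + (1:Int) * 2^n = (2*X + 1) * 2^n by ring,
            show Y * 2^(n+1) + (0:Int) * 2^n = (2*Y + 0) * 2^n by ring,
            ihc 0 1 (2*X + 1) (2*Y + 0) (Or.inl rfl) (Or.inr rfl) (by omega) (by omega),
            hWsucc, hWn,
            pv_wiki_step01 wx wy _ _ (by rw [hb0]; exact hc0) (by rw [hb1]; exact hc1)]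
        simp only [pvT, hs]
        norm_num
        constructor <;> ring
      · -- e=0 d=1 b1=1 b0=0 (digit w=2)
        have hwv : pvWA h (n:Int) = 2 := by
          simp only [pvWA]
          rw [hbitA0, hbitA1, hc0, hc1]
          decide
        have hE : pvE1A h 0 1 (n:Int) = 0 := by
          simp only [pvE1A, hwv]; decide
        have hD : pvD1A h 0 1 (n:Int) = 1 := by
          simp only [pvD1A, hwv]; decide
        have hlx : pvBitA (pvLA h 0 1 (n:Int)) 0 = 1 := by
          simp only [pvLA, hwv]; decide
        have hly : pvBitA (pvLA h 0 1 (n:Int)) 1 = 1 := by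
          simp only [pvLA, hwv]; decide
        rw [hE, hD, hlx, hly,
            show X * 2^(n+1) + (1:Int) * 2^n = (2*X + 1) * 2^n by ring,
            show Y * 2^(n+1) + (1:Int) * 2^n = (2*Y + 1) * 2^n by ring,
            ihc 0 1 (2*X + 1) (2*Y + 1) (Or.inl rfl) (Or.inr rfl) (by omega) (by omega),
            hWsucc, hWn,
            pv_wiki_step10 wx wy _ _ (by rw [hb0]; exact hc0) (by rw [hb1]; exact hc1)]
        simp only [pvT, hs]
        norm_num
        constructor <;> ring
      · -- e=0 d=1 b1=1 b0=1 (digit w=3)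
        have hwv : pvWA h (n:Int) = 3 := by
          simp only [pvWA]
          rw [hbitA0, hbitA1, hc0, hc1]
          decide
        have hE : pvE1A h 0 1 (n:Int) = 3 := by
          simp only [pvE1A, hwv]; decide
        have hD : pvD1A h 0 1 (n:Int) = 0 := by
          simp only [pvD1A, hwv]; decide
        have hlx : pvBitA (pvLA h 0 1 (n:Int)) 0 = 0 := by
          simp only [pvLA, hwv]; decide
        have hly : pvBitA (pvLA h 0 1 (n:Int)) 1 = 1 := by
          simp only [pvLA, hwv]; decide
        rw [hE, hD, hlx, hly,
            show X * 2^(n+1) + (0:Int) * 2^n = (2*X + 0) * 2^n by ring,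
            show Y * 2^(n+1) + (1:Int) * 2^n = (2*Y + 1) * 2^n by ring,
            ihc 3 0 (2*X + 0) (2*Y + 1) (Or.inr rfl) (Or.inl rfl) (by omega) (by omega),
            hWsucc, hWn,
            pv_wiki_step11 wx wy _ _ (by rw [hb0]; exact hc0) (by rw [hb1]; exact hc1)]
        simp only [pvT, hs]
        norm_num
        constructor <;> ring
      · -- e=3 d=0 b1=0 b0=0 (digit w=0)
        have hwv : pvWA h (n:Int) = 0 := by
          simp only [pvWA]
          rw [hbitA0, hbitA1, hc0, hc1]
          decide
        have hE : pvE1A h 3 0 (n:Int) = 3 := by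
          simp only [pvE1A, hwv]; decide
        have hD : pvD1A h 3 0 (n:Int) = 1 := by
          simp only [pvD1A, hwv]; decide
        have hlx : pvBitA (pvLA h 3 0 (n:Int)) 0 = 1 := by
          simp only [pvLA, hwv]; decide
        have hly : pvBitA (pvLA h 3 0 (n:Int)) 1 = 1 := by
          simp only [pvLA, hwv]; decide
        rw [hE, hD, hlx, hly,
            show X * 2^(n+1) + (1:Int) * 2^n = (2*X + 1) * 2^n by ring,
            show Y * 2^(n+1) + (1:Int) * 2^n = (2*Y + 1) * 2^n by ring,
            ihc 3 1 (2*X + 1) (2*Y + 1) (Or.inr rfl) (Or.inr rfl) (by omega) (by omega),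
            hWsucc, hWn,
            pv_wiki_step00 wx wy _ _ (by rw [hb0]; exact hc0) (by rw [hb1]; exact hc1)]
        simp only [pvT]
        norm_num
        constructor <;> ring
      · -- e=3 d=0 b1=0 b0=1 (digit w=1)
        have hwv : pvWA h (n:Int) = 1 := by
          simp only [pvWA]
          rw [hbitA0, hbitA1, hc0, hc1]
          decide
        have hE : pvE1A h 3 0 (n:Int) = 3 := by
          simp only [pvE1A, hwv]; decide
        have hD : pvD1A h 3 0 (n:Int) = 0 := by
          simp only [pvD1A, hwv]; decide
        have hlx : pvBitA (pvLA h 3 0 (n:Int)) 0 = 1 := by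
          simp only [pvLA, hwv]; decide
        have hly : pvBitA (pvLA h 3 0 (n:Int)) 1 = 0 := by
          simp only [pvLA, hwv]; decide
        rw [hE, hD, hlx, hly,
            show X * 2^(n+1) + (1:Int) * 2^n = (2*X + 1) * 2^n by ring,
            show Y * 2^(n+1) + (0:Int) * 2^n = (2*Y + 0) * 2^n by ring,
            ihc 3 0 (2*X + 1) (2*Y + 0) (Or.inr rfl) (Or.inl rfl) (by omega) (by omega),
            hWsucc, hWn,
            pv_wiki_step01 wx wy _ _ (by rw [hb0]; exact hc0) (by rw [hb1]; exact hc1)]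
        simp only [pvT, hs]
        norm_num
        constructor <;> ring
      · -- e=3 d=0 b1=1 b0=0 (digit w=2)
        have hwv : pvWA h (n:Int) = 2 := by
          simp only [pvWA]
          rw [hbitA0, hbitA1, hc0, hc1]
          decide
        have hE : pvE1A h 3 0 (n:Int) = 3 := by
          simp only [pvE1A, hwv]; decide
        have hD : pvD1A h 3 0 (n:Int) = 0 := by
          simp only [pvD1A, hwv]; decide
        have hlx : pvBitA (pvLA h 3 0 (n:Int)) 0 = 0 := by
          simp only [pvLA, hwv]; decide
        have hly : pvBitA (pvLA h 3 0 (n:Int)) 1 = 0 := by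
          simp only [pvLA, hwv]; decide
        rw [hE, hD, hlx, hly,
            show X * 2^(n+1) + (0:Int) * 2^n = (2*X + 0) * 2^n by ring,
            show Y * 2^(n+1) + (0:Int) * 2^n = (2*Y + 0) * 2^n by ring,
            ihc 3 0 (2*X + 0) (2*Y + 0) (Or.inr rfl) (Or.inl rfl) (by omega) (by omega),
            hWsucc, hWn,
            pv_wiki_step10 wx wy _ _ (by rw [hb0]; exact hc0) (by rw [hb1]; exact hc1)]
        simp only [pvT, hs]
        norm_num
        constructor <;> ring
      · -- e=3 d=0 b1=1 b0=1 (digit w=3)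
        have hwv : pvWA h (n:Int) = 3 := by
          simp only [pvWA]
          rw [hbitA0, hbitA1, hc0, hc1]
          decide
        have hE : pvE1A h 3 0 (n:Int) = 0 := by
          simp only [pvE1A, hwv]; decide
        have hD : pvD1A h 3 0 (n:Int) = 1 := by
          simp only [pvD1A, hwv]; decide
        have hlx : pvBitA (pvLA h 3 0 (n:Int)) 0 = 0 := by
          simp only [pvLA, hwv]; decide
        have hly : pvBitA (pvLA h 3 0 (n:Int)) 1 = 1 := by
          simp only [pvLA, hwv]; decide
        rw [hE, hD, hlx, hly,
            show X * 2^(n+1) + (0:Int) * 2^n = (2*X + 0) * 2^n by ring,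
            show Y * 2^(n+1) + (1:Int) * 2^n = (2*Y + 1) * 2^n by ring,
            ihc 0 1 (2*X + 0) (2*Y + 1) (Or.inl rfl) (Or.inr rfl) (by omega) (by omega),
            hWsucc, hWn,
            pv_wiki_step11 wx wy _ _ (by rw [hb0]; exact hc0) (by rw [hb1]; exact hc1)]
        simp only [pvT, hs]
        norm_num
        constructor <;> ring
      · -- e=3 d=1 b1=0 b0=0 (digit w=0)
        have hwv : pvWA h (n:Int) = 0 := by
          simp only [pvWA]
          rw [hbitA0, hbitA1, hc0, hc1]
          decide
        have hE : pvE1A h 3 1 (n:Int) = 3 := by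
          simp only [pvE1A, hwv]; decide
        have hD : pvD1A h 3 1 (n:Int) = 0 := by
          simp only [pvD1A, hwv]; decide
        have hlx : pvBitA (pvLA h 3 1 (n:Int)) 0 = 1 := by
          simp only [pvLA, hwv]; decide
        have hly : pvBitA (pvLA h 3 1 (n:Int)) 1 = 1 := by
          simp only [pvLA, hwv]; decide
        rw [hE, hD, hlx, hly,
            show X * 2^(n+1) + (1:Int) * 2^n = (2*X + 1) * 2^n by ring,
            show Y * 2^(n+1) + (1:Int) * 2^n = (2*Y + 1) * 2^n by ring,
            ihc 3 0 (2*X + 1) (2*Y + 1) (Or.inr rfl) (Or.inl rfl) (by omega) (by omega),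
            hWsucc, hWn,
            pv_wiki_step00 wx wy _ _ (by rw [hb0]; exact hc0) (by rw [hb1]; exact hc1)]
        simp only [pvT]
        norm_num
        constructor <;> ring
      · -- e=3 d=1 b1=0 b0=1 (digit w=1)
        have hwv : pvWA h (n:Int) = 1 := by
          simp only [pvWA]
          rw [hbitA0, hbitA1, hc0, hc1]
          decide
        have hE : pvE1A h 3 1 (n:Int) = 3 := by
          simp only [pvE1A, hwv]; decide
        have hD : pvD1A h 3 1 (n:Int) = 1 := by
          simp only [pvD1A, hwv]; decide
        have hlx : pvBitA (pvLA h 3 1 (n:Int)) 0 = 0 := by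
          simp only [pvLA, hwv]; decide
        have hly : pvBitA (pvLA h 3 1 (n:Int)) 1 = 1 := by
          simp only [pvLA, hwv]; decide
        rw [hE, hD, hlx, hly,
            show X * 2^(n+1) + (0:Int) * 2^n = (2*X + 0) * 2^n by ring,
            show Y * 2^(n+1) + (1:Int) * 2^n = (2*Y + 1) * 2^n by ring,
            ihc 3 1 (2*X + 0) (2*Y + 1) (Or.inr rfl) (Or.inr rfl) (by omega) (by omega),
            hWsucc, hWn,
            pv_wiki_step01 wx wy _ _ (by rw [hb0]; exact hc0) (by rw [hb1]; exact hc1)]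
        simp only [pvT, hs]
        norm_num
        constructor <;> ring
      · -- e=3 d=1 b1=1 b0=0 (digit w=2)
        have hwv : pvWA h (n:Int) = 2 := by
          simp only [pvWA]
          rw [hbitA0, hbitA1, hc0, hc1]
          decide
        have hE : pvE1A h 3 1 (n:Int) = 3 := by
          simp only [pvE1A, hwv]; decide
        have hD : pvD1A h 3 1 (n:Int) = 1 := by
          simp only [pvD1A, hwv]; decide
        have hlx : pvBitA (pvLA h 3 1 (n:Int)) 0 = 0 := by
          simp only [pvLA, hwv]; decide
        have hly : pvBitA (pvLA h 3 1 (n:Int)) 1 = 0 := by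
          simp only [pvLA, hwv]; decide
        rw [hE, hD, hlx, hly,
            show X * 2^(n+1) + (0:Int) * 2^n = (2*X + 0) * 2^n by ring,
            show Y * 2^(n+1) + (0:Int) * 2^n = (2*Y + 0) * 2^n by ring,
            ihc 3 1 (2*X + 0) (2*Y + 0) (Or.inr rfl) (Or.inr rfl) (by omega) (by omega),
            hWsucc, hWn,
            pv_wiki_step10 wx wy _ _ (by rw [hb0]; exact hc0) (by rw [hb1]; exact hc1)]
        simp only [pvT, hs]
        norm_num
        constructor <;> ring
      · -- e=3 d=1 b1=1 b0=1 (digit w=3)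
        have hwv : pvWA h (n:Int) = 3 := by
          simp only [pvWA]
          rw [hbitA0, hbitA1, hc0, hc1]
          decide
        have hE : pvE1A h 3 1 (n:Int) = 0 := by
          simp only [pvE1A, hwv]; decide
        have hD : pvD1A h 3 1 (n:Int) = 0 := by
          simp only [pvD1A, hwv]; decide
        have hlx : pvBitA (pvLA h 3 1 (n:Int)) 0 = 1 := by
          simp only [pvLA, hwv]; decide
        have hly : pvBitA (pvLA h 3 1 (n:Int)) 1 = 0 := by
          simp only [pvLA, hwv]; decide
        rw [hE, hD, hlx, hly,
            show X * 2^(n+1) + (1:Int) * 2^n = (2*X + 1) * 2^n by ring,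
            show Y * 2^(n+1) + (0:Int) * 2^n = (2*Y + 0) * 2^n by ring,
            ihc 0 0 (2*X + 1) (2*Y + 0) (Or.inl rfl) (Or.inl rfl) (by omega) (by omega),
            hWsucc, hWn,
            pv_wiki_step11 wx wy _ _ (by rw [hb0]; exact hc0) (by rw [hb1]; exact hc1)]
        simp only [pvT, hs]
        norm_num
        constructor <;> ring

-- A's inner routine in terms of B's LSB-first decode
theorem pv_inner (m h : Int) (hm : 0 ≤ m) :
    pvHilbertindexinv2dA m h 0 0 = ((pvW m.toNat h).1, (pvW m.toNat h).2.1)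
  ∧ pvHilbertindexinv2dA m h 0 1 = ((pvW m.toNat h).2.1, (pvW m.toNat h).1) := by
  obtain ⟨-, hc⟩ := pv_key m.toNat h
  have h1 := hc 0 0 0 0 (Or.inl rfl) (Or.inl rfl) le_rfl le_rfl
  have h2 := hc 0 1 0 0 (Or.inl rfl) (Or.inr rfl) le_rfl le_rfl
  rw [Int.toNat_of_nonneg hm] at h1 h2
  simp only [pvT, zero_mul, zero_add] at h1 h2
  norm_num at h1 h2
  exact ⟨h1, h2⟩

theorem pv_wfold (m h : Int) (hm : 0 ≤ m) :
    (PySem.List.pyRange 0 m 1).foldl pvWikiStepB (0, 0, h) = pvW m.toNat h := by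
  rw [pvW, Int.toNat_of_nonneg hm]

theorem pv_pref_add (mmin : Int) (L : List Int) (s0 h : Int) :
    L.foldl (pvPrefStepA mmin) (s0, h)
    = (s0 + (L.foldl (pvPrefStepA mmin) (0, h)).1, (L.foldl (pvPrefStepA mmin) (0, h)).2) := by
  induction L generalizing s0 h with
  | nil => simp
  | cons a L ih =>
    simp only [List.foldl_cons, pvPrefStepA]
    rw [ih, ih (s0 := 0 + pvBitA h a * ↑(1 <<< (a - mmin).toNat))]
    refine Prod.ext ?_ rfl
    simp
    ring

theorem pv_pref_main (s b : Nat) (h : Int) :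
    (PySem.List.pyRange (2*(b : Int) + (s : Int) - 1) (2*(b : Int) - 1) (-1)).foldl
        (pvPrefStepA (b : Int)) (0, h)
    = ((h / 2 ^ (2*b) % 2 ^ s) * 2 ^ b, h - (h / 2 ^ (2*b) % 2 ^ s) * 2 ^ (2*b)) := by
  induction s generalizing h with
  | zero =>
    rw [show (2*(b : Int) + ((0:Nat) : Int) - 1) = 2*(b:Int) - 1 by push_cast; ring]
    rw [pv_pyRange_desc_nil _ _ le_rfl]
    simp
  | succ s ih =>
    rw [show (2*(b : Int) + ((s+1:Nat) : Int) - 1) = 2*(b:Int) + (s:Int) by push_cast; ring]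
    rw [pv_pyRange_desc_cons _ _ (by omega)]
    rw [show (2*(b:Int) + (s:Int) - 1) = 2*(b:Int) + (s:Int) - 1 from rfl]
    simp only [List.foldl_cons]
    have hstep : pvPrefStepA (b:Int) (0, h) (2*(b:Int) + (s:Int))
        = (h / 2 ^ (2*b+s) % 2 * 2 ^ (b+s), h - h / 2 ^ (2*b+s) % 2 * 2 ^ (2*b+s)) := by
      simp only [pvPrefStepA, pv_bitA_eq]
      rw [show ((2*(b:Int) + (s:Int))).toNat = 2*b+s by omega,
          show ((2*(b:Int) + (s:Int)) - (b:Int)).toNat = b+s by omega]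
      refine Prod.ext ?_ ?_ <;> · show _ = _; push_cast [Nat.one_shiftLeft]; ring
    rw [hstep, pv_pref_add]
    set h1 := h - h / 2 ^ (2*b+s) % 2 * 2 ^ (2*b+s) with hh1
    rw [ih h1]
    have e2 : ((2:Int) ^ (2*b+s)) = 2 ^ (2*b) * 2 ^ s := by rw [← pow_add]
    have hq1 : h1 / 2 ^ (2*b) = h / 2 ^ (2*b) - h / 2 ^ (2*b+s) % 2 * 2 ^ s := by
      rw [hh1, e2]
      rw [show h - h / (2 ^ (2*b) * 2 ^ s) % 2 * (2 ^ (2*b) * 2 ^ s)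
            = h + (-(h / (2 ^ (2*b) * 2 ^ s) % 2 * 2 ^ s)) * 2 ^ (2*b) by ring,
          Int.add_mul_ediv_right _ _ (by positivity : (0:Int) < 2^(2*b)).ne']
      ring
    have hl : h / 2 ^ (2*b+s) = h / 2 ^ (2*b) / 2 ^ s := by
      rw [e2, Int.ediv_ediv_of_nonneg (by positivity)]
    have hm : h1 / 2 ^ (2*b) % 2 ^ s = h / 2 ^ (2*b) % 2 ^ s := by
      rw [hq1, show h / 2 ^ (2*b) - h / 2 ^ (2*b+s) % 2 * 2 ^ s
            = h / 2 ^ (2*b) - 2 ^ s * (h / 2 ^ (2*b+s) % 2) by ring,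
          Int.sub_mul_emod_self_left]
    have hsplit : h / 2 ^ (2*b) % 2 ^ (s+1)
        = (h / 2 ^ (2*b) / 2 ^ s % 2) * 2 ^ s + h / 2 ^ (2*b) % 2 ^ s := by
      have := pv_half_split (h / 2 ^ (2*b)) (2 ^ s) (by positivity)
      rw [show ((2:Int) ^ (s+1)) = 2 * 2 ^ s by ring]
      exact this
    refine Prod.ext ?_ ?_
    · show h / 2 ^ (2*b+s) % 2 * 2 ^ (b+s) + h1 / 2 ^ (2*b) % 2 ^ s * 2 ^ b
        = h / 2 ^ (2*b) % 2 ^ (s+1) * 2 ^ b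
      rw [hm, hsplit, hl, pow_add]
      ring
    · show h1 - h1 / 2 ^ (2*b) % 2 ^ s * 2 ^ (2*b) = h - h / 2 ^ (2*b) % 2 ^ (s+1) * 2 ^ (2*b)
      rw [hm, hsplit, hh1, hl, e2]
      ring

theorem pv_main (mmin mmax h : Int) (h0 : 0 ≤ mmin) (hle : mmin ≤ mmax) :
    (((PySem.List.pyRange (mmax + mmin - 1) (mmin + mmin - 1) (-1)).foldl
        (pvPrefStepA mmin) (0, h)).1
      = PySem.Int.mod (h >>> (2*mmin).toNat) (1 <<< (mmax - mmin).toNat) <<< mmin.toNat)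
    ∧ (((PySem.List.pyRange (mmax + mmin - 1) (mmin + mmin - 1) (-1)).foldl
        (pvPrefStepA mmin) (0, h)).2
      = h - PySem.Int.mod (h >>> (2*mmin).toNat) (1 <<< (mmax - mmin).toNat) <<< (2*mmin).toNat) := by
  set b := mmin.toNat with hb
  set s := (mmax - mmin).toNat with hs
  have hbm : ((b : Nat) : Int) = mmin := Int.toNat_of_nonneg h0
  have hlist : PySem.List.pyRange (mmax + mmin - 1) (mmin + mmin - 1) (-1)
      = PySem.List.pyRange (2*(b : Int) + (s : Int) - 1) (2*(b : Int) - 1) (-1) := by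
    rw [show 2*(b:Int) + (s:Int) - 1 = mmax + mmin - 1 by omega,
        show 2*(b:Int) - 1 = mmin + mmin - 1 by omega]
  have hstepf : pvPrefStepA mmin = pvPrefStepA (b : Int) := by rw [hbm]
  have ht2 : (2*mmin).toNat = 2*b := by omega
  have hsl : ((1 <<< s : Nat) : Int) = 2 ^ s := by
    rw [Nat.one_shiftLeft]; push_cast; rfl
  have hmid : PySem.Int.mod (h >>> (2*mmin).toNat) ((1 <<< (mmax - mmin).toNat : Nat) : Int)
      = h / 2 ^ (2*b) % 2 ^ s := by
    rw [← hs, hsl, ht2, pv_shiftR, PySem.Int.mod_eq_emod_of_pos (by positivity)]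
  rw [hlist, hstepf, pv_pref_main]
  constructor
  · rw [hmid, pv_shiftL]
  · rw [hmid, pv_shiftL, ht2]

-- ===== VERDICT (by name: the statement is the Claim_ definition above) =====
theorem generalhilbertindexinv_2d_py_spec : Claim_equal_generalhilbertindexinv_2d_py := by
  unfold Claim_equal_generalhilbertindexinv_2d_py
  intro m0 m1 h_ _ hpre
  obtain ⟨h0, h1⟩ := hpre
  unfold Spec_generalhilbertindexinv_2d_py
  unfold generalhilbertindexinv_2d_py generalhilbertindexinv_2d_py_alt
  by_cases hge : m0 ≥ m1
  · simp only [if_pos hge]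
    obtain ⟨hm1, hm2⟩ := pv_main m1 m0 h_ h1 hge
    rw [hm1, hm2, pv_wfold _ _ h1, (pv_inner m1 _ h1).1]
    simp
  · simp only [if_neg hge]
    obtain ⟨hm1, hm2⟩ := pv_main m0 m1 h_ h0 (by omega)
    rw [hm1, hm2, pv_wfold _ _ h0, (pv_inner m0 _ h0).2]
    simp
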